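-- pv_equiv track=rewrite | github.com/Ubspy/HackKState | player.py | changeNotes
-- ===== SOURCE A (Python) =====
-- def changeNotes(noteList, noteTuple):
--     noteIndex = 0
--     newNoteTuple = ()
--
--     for i in noteTuple:
--         if i[0] == 'c4':
--             iList = list(i)
--             iList[0] = noteList[noteIndex]
--             noteIndex += 1
--             newNoteTuple += tuple(iList),
--         else:
--             newNoteTuple += i,
--
--     return newNoteTuple
-- ===== SOURCE B (Python) =====
-- def changeNotes(noteList, noteTuple):
--     positions = [idx for idx, note in enumerate(noteTuple) if note[0] == 'c4']
--     result = list(noteTuple)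
--     for k, pos in enumerate(positions):
--         note = list(result[pos])
--         note[0] = noteList[k]
--         result[pos] = tuple(note)
--     return tuple(result)
-- ===== Notes on version B (the rewrite author's own statement) =====
-- stated objective: alternative
-- what changed: B is two-pass: it first gathers the indices of 'c4'-headed rows, then patches exactly those positions of a copy of noteTuple with successive noteList values, instead of A's single pass that rebuilds the tuple row by row with a running note counter.
import Mathlib
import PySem

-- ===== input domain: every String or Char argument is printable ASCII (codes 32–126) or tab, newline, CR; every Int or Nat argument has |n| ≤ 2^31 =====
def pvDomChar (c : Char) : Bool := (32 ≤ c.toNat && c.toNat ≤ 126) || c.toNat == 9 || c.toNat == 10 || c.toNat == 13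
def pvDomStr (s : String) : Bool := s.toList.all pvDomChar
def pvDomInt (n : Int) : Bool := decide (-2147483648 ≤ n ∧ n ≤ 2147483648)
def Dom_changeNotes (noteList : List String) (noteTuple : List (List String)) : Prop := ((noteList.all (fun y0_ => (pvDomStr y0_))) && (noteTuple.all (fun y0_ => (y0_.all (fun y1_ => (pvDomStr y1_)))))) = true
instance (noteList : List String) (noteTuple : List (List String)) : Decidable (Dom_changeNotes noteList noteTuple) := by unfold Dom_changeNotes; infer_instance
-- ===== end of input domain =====

-- B replaces A's single pass with a running counter by a two-pass scheme (gather the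
-- 'c4' positions, then patch them in a copy); same cost, different decomposition.

-- ===== PORT A =====
-- the for-loop of A: state = (noteIndex, newNoteTuple-accumulator)
def changeNotesGo (noteList : List String) : List (List String) → Int → List (List String) → List (List String)
  | [], _, acc => acc
  | i :: rest, noteIndex, acc =>
    if PySem.List.pyGetD i 0 "" == "c4" then
      -- iList = list(i); iList[0] = noteList[noteIndex]; append tuple(iList)
      changeNotesGo noteList rest (noteIndex + 1)
        (acc ++ [PySem.List.pyGetD noteList noteIndex "" :: i.drop 1])
    else
      changeNotesGo noteList rest noteIndex (acc ++ [i])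

def changeNotes (noteList : List String) (noteTuple : List (List String)) : List (List String) :=
  changeNotesGo noteList noteTuple 0 []

-- ===== PORT B =====
def changeNotes_alt (noteList : List String) (noteTuple : List (List String)) : List (List String) :=
  -- positions = [idx for idx, note in enumerate(noteTuple) if note[0] == 'c4']
  let positions := ((PySem.List.enumerate noteTuple).filter
      (fun p => PySem.List.pyGetD p.2 0 "" == "c4")).map Prod.fst
  -- for k, pos in enumerate(positions): note = list(result[pos]); note[0] = noteList[k]; result[pos] = tuple(note)
  (PySem.List.enumerate positions).foldl
    (fun result kp =>
      PySem.List.pySetD result kp.2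
        (PySem.List.pyGetD noteList kp.1 "" :: (PySem.List.pyGetD result kp.2 []).drop 1))
    noteTuple

-- ===== PRECONDITION & SPEC =====
-- Pre_ excludes exactly the inputs where Python A raises IndexError: an empty row
-- (i[0]), or more 'c4'-headed rows than noteList has entries (noteList[noteIndex]).
def Pre_changeNotes (noteList : List String) (noteTuple : List (List String)) : Prop :=
  (∀ r ∈ noteTuple, r ≠ []) ∧
  noteTuple.countP (fun r => r.headD "" == "c4") ≤ noteList.length
instance (noteList : List String) (noteTuple : List (List String)) : Decidable (Pre_changeNotes noteList noteTuple) := by unfold Pre_changeNotes; infer_instance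

def pvWitness_changeNotes : List String × List (List String) :=
  (["e4"], [["c4", "1"], ["d4", "2"]])

def Spec_changeNotes (noteList : List String) (noteTuple : List (List String)) (out : List (List String)) : Prop := out = changeNotes_alt noteList noteTuple
instance (noteList : List String) (noteTuple : List (List String)) (out : List (List String)) : Decidable (Spec_changeNotes noteList noteTuple out) := by unfold Spec_changeNotes; infer_instance

-- ===== CLAIM (what is proved, stated in full; the proofs are below) =====
def Claim_equal_changeNotes : Prop := ∀ (noteList : List String) (noteTuple : List (List String)), Dom_changeNotes noteList noteTuple → Pre_changeNotes noteList noteTuple → Spec_changeNotes noteList noteTuple (changeNotes noteList noteTuple)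

-- ===== LEMMAS AND PROOFS =====

-- common reference form: one structural pass, reading noteList at offset j
def pvCore (noteList : List String) : Int → List (List String) → List (List String)
  | _, [] => []
  | j, r :: rest =>
    if PySem.List.pyGetD r 0 "" == "c4" then
      (PySem.List.pyGetD noteList j "" :: r.drop 1) :: pvCore noteList (j + 1) rest
    else
      r :: pvCore noteList j rest

lemma changeNotesGo_eq_core (noteList : List String) :
    ∀ (rows : List (List String)) (j : Int) (acc : List (List String)),
      changeNotesGo noteList rows j acc = acc ++ pvCore noteList j rows := by
  intro rows
  induction rows with
  | nil => intro j acc; simp [changeNotesGo, pvCore]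
  | cons r rest ih =>
    intro j acc
    by_cases h : PySem.List.pyGetD r 0 "" == "c4" <;>
      simp [changeNotesGo, pvCore, h, ih]

-- B's fold step, with an explicit offset into noteList
def pvStep (noteList : List String) (off : Int) :
    List (List String) → Int × Int → List (List String) :=
  fun result kp =>
    PySem.List.pySetD result kp.2
      (PySem.List.pyGetD noteList (kp.1 + off) "" :: (PySem.List.pyGetD result kp.2 []).drop 1)

lemma pyGetD_cons_succ' {α : Type} (a : α) (l : List α) (p : Int) (hp : 0 ≤ p) (d : α) :
    PySem.List.pyGetD (a :: l) (p + 1) d = PySem.List.pyGetD l p d := by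
  obtain ⟨n, rfl⟩ : ∃ n : ℕ, p = (n : ℤ) := ⟨p.toNat, (Int.toNat_of_nonneg hp).symm⟩
  simp [PySem.List.pyGetD, PySem.List.pyGet?_cons_succ]

lemma pySetD_cons_succ' {α : Type} (a : α) (l : List α) (p : Int) (hp : 0 ≤ p) (v : α) :
    PySem.List.pySetD (a :: l) (p + 1) v = a :: PySem.List.pySetD l p v := by
  obtain ⟨n, rfl⟩ : ∃ n : ℕ, p = (n : ℤ) := ⟨p.toNat, (Int.toNat_of_nonneg hp).symm⟩
  by_cases h : n < l.length
  · have h1 : ((n : ℤ) + 1) < ((a :: l).length : ℤ) := by simp; omega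
    have h2 : ((n : ℤ)) < (l.length : ℤ) := by exact_mod_cast h
    have h3 : ((n : ℤ) + 1).toNat = n + 1 := by omega
    simp [PySem.List.pySetD, PySem.List.pySet?, PySem.List.pyIdx?, h2, h3]
    rw [if_pos (by omega)]
    simp [List.set]
  · have h1 : ¬ ((n : ℤ) + 1) < ((a :: l).length : ℤ) := by simp; omega
    have h2 : ¬ ((n : ℤ)) < (l.length : ℤ) := by exact_mod_cast h
    simp [PySem.List.pySetD, PySem.List.pySet?, PySem.List.pyIdx?, h2]
    rw [if_pos (by omega)]
    simp

lemma pvStep_shift (noteList : List String) :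
    ∀ (ps : List (Int × Int)), (∀ kp ∈ ps, 0 ≤ kp.2) →
      ∀ (a : List String) (l : List (List String)) (off dk : Int),
        (ps.map (fun p => (p.1 + dk, p.2 + 1))).foldl (pvStep noteList off) (a :: l)
          = a :: ps.foldl (pvStep noteList (off + dk)) l := by
  intro ps
  induction ps with
  | nil => intro _ a l off dk; simp
  | cons p rest ih =>
    intro hps a l off dk
    have hp : 0 ≤ p.2 := hps p (by simp)
    have hstep : pvStep noteList off (a :: l) (p.1 + dk, p.2 + 1)
        = a :: pvStep noteList (off + dk) l p := by
      simp only [pvStep]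
      rw [pyGetD_cons_succ' a l p.2 hp, pySetD_cons_succ' a l p.2 hp]
      ring_nf
    simp only [List.map_cons, List.foldl_cons, hstep]
    exact ih (fun kp hkp => hps kp (by simp [hkp])) a (pvStep noteList (off + dk) l p) off dk

def pvPosOf (rows : List (List String)) : List Int :=
  ((PySem.List.enumerate rows).filter (fun p => PySem.List.pyGetD p.2 0 "" == "c4")).map Prod.fst

lemma enumerate_shift {α : Type} (xs : List α) :
    ∀ s : Int, PySem.List.enumerate xs (s + 1)
      = (PySem.List.enumerate xs s).map (fun p => (p.1 + 1, p.2)) := by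
  induction xs with
  | nil => intro s; simp [PySem.List.enumerate]
  | cons x t ih => intro s; simp [PySem.List.enumerate_cons, ih (s + 1), ih s]

lemma enumerate_map {α β : Type} (f : α → β) (xs : List α) :
    ∀ s : Int, PySem.List.enumerate (xs.map f) s
      = (PySem.List.enumerate xs s).map (fun p => (p.1, f p.2)) := by
  induction xs with
  | nil => intro s; simp [PySem.List.enumerate]
  | cons x t ih => intro s; simp [PySem.List.enumerate_cons, ih (s + 1)]

lemma pvPosOf_cons (r : List String) (rest : List (List String)) :
    pvPosOf (r :: rest)
      = (if PySem.List.pyGetD r 0 "" == "c4" then [(0 : Int)] else [])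
          ++ (pvPosOf rest).map (fun p => p + 1) := by
  simp only [pvPosOf, PySem.List.enumerate_cons]
  rw [show (0 : Int) + 1 = 0 + 1 from rfl, enumerate_shift rest 0]
  rw [List.filter_cons, List.filter_map]
  by_cases h : PySem.List.pyGetD r 0 "" == "c4"
  · simp [h, List.map_map, Function.comp_def]
  · simp [h, List.map_map, Function.comp_def]

lemma pvPosOf_nonneg (rows : List (List String)) : ∀ p ∈ pvPosOf rows, 0 ≤ p := by
  intro p hp
  simp only [pvPosOf, List.mem_map] at hp
  obtain ⟨q, hq, rfl⟩ := hp
  have := List.mem_of_mem_filter hq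
  rw [PySem.List.mem_enumerate_iff] at this
  obtain ⟨k, _, rfl⟩ := this
  simp

lemma fold_posOf_eq_core (noteList : List String) :
    ∀ (rows : List (List String)) (j : Int),
      (PySem.List.enumerate (pvPosOf rows)).foldl (pvStep noteList j) rows
        = pvCore noteList j rows := by
  intro rows
  induction rows with
  | nil => intro j; simp [pvPosOf, PySem.List.enumerate, pvCore]
  | cons r rest ih =>
    intro j
    have hnn : ∀ kp ∈ PySem.List.enumerate (pvPosOf rest), 0 ≤ kp.2 := by
      intro kp hkp
      rw [PySem.List.mem_enumerate_iff] at hkp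
      obtain ⟨k, hk, rfl⟩ := hkp
      exact pvPosOf_nonneg rest _ (by simp)
    rw [pvPosOf_cons]
    by_cases h : PySem.List.pyGetD r 0 "" == "c4"
    · simp only [h, if_pos, List.singleton_append]
      rw [PySem.List.enumerate_cons, enumerate_map, enumerate_shift]
      simp only [List.map_map]
      have hcomp : ((fun p : ℤ × ℤ => (p.1 + 1, p.2)) ∘ fun p : ℤ × ℤ => (p.1, p.2 + 1))
          = fun p : ℤ × ℤ => (p.1 + 1, p.2 + 1) := rfl
      have hcomp' : ((fun p : ℤ × ℤ => (p.1, p.2 + 1)) ∘ fun p : ℤ × ℤ => (p.1 + 1, p.2))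
          = fun p : ℤ × ℤ => (p.1 + 1, p.2 + 1) := rfl
      have hfirst : pvStep noteList j (r :: rest) ((0 : ℤ), (0 : ℤ))
          = (PySem.List.pyGetD noteList j "" :: r.drop 1) :: rest := by
        simp [pvStep, PySem.List.pySetD, PySem.List.pySet?, PySem.List.pyIdx?,
          PySem.List.pyGetD, PySem.List.pyGet?]
      simp only [List.foldl_cons, hfirst, hcomp']
      rw [pvStep_shift noteList _ hnn _ rest j 1, ih (j + 1)]
      simp [pvCore, h]
    · simp only [h, if_neg, Bool.not_eq_true, List.nil_append]
      rw [enumerate_map]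
      have hz : (PySem.List.enumerate (pvPosOf rest)).map (fun p => (p.1, p.2 + 1))
          = (PySem.List.enumerate (pvPosOf rest)).map (fun p => (p.1 + 0, p.2 + 1)) := by
        simp
      rw [hz, pvStep_shift noteList _ hnn _ rest j 0, ih (j + 0)]
      simp [pvCore, h]

lemma changeNotes_alt_eq_core (noteList : List String) (noteTuple : List (List String)) :
    changeNotes_alt noteList noteTuple = pvCore noteList 0 noteTuple := by
  have hstep : (fun (result : List (List String)) (kp : Int × Int) =>
      PySem.List.pySetD result kp.2
        (PySem.List.pyGetD noteList kp.1 "" :: (PySem.List.pyGetD result kp.2 []).drop 1))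
      = pvStep noteList 0 := by
    funext result kp; simp [pvStep]
  rw [changeNotes_alt, hstep]
  exact fold_posOf_eq_core noteList noteTuple 0

-- ===== VERDICT (by name: the statement is the Claim_ definition above) =====
theorem changeNotes_spec : Claim_equal_changeNotes := by
  intro noteList noteTuple _ _
  unfold Spec_changeNotes
  rw [changeNotes, changeNotesGo_eq_core, changeNotes_alt_eq_core]
  simp
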